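-- pv_equiv track=rewrite | github.com/youssef-e/Pytesseract-Opencv | Utils/Extract_Utils.py | id_extract
-- ===== SOURCE A (Python) =====
-- def id_extract(line):
--     id_nbr="-1"
--     if ("ationale" in line.lower() or "carte" in line.lower() or " identite" in line.lower()):
--         id_nbrs = line.split(" ")
--         for value in id_nbrs:
--             notFound = True
--             for c in value:
--                 if notFound :
--                     if(c>='0' and c<='9'):
--                         id_nbr=value
--                         notFound = False
--                         break
--                     else:
--                         break
--
--     return id_nbr
-- ===== SOURCE B (Python) =====
-- def id_extract(line):
--     low = line.lower()
--     if "ationale" in low or "carte" in low or " identite" in low: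
--         best = "-1"
--         cur = None   # current word accumulated character by character, only if it began with a digit
--         prev = ' '   # character before the current one; a word starts at position 0 or after a space
--         for c in line:
--             if c == ' ':
--                 if cur is not None:
--                     best = cur
--                 cur = None
--             elif prev == ' ' and '0' <= c <= '9':
--                 cur = c
--             elif cur is not None:
--                 cur += c
--             prev = c
--         return cur if cur is not None else best
--     return "-1"
-- ===== Notes on version B (the rewrite author's own statement) =====
-- stated objective: alternative
-- what changed: A splits the line into a word list and scans all words with a flagged inner character loop, keeping the last digit-leading word; B never builds a word list: it makes one character-level pass over the raw line, accumulating the current word only when it began with a digit and committing it at each space, so no split and no nested loop.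
import Mathlib
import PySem

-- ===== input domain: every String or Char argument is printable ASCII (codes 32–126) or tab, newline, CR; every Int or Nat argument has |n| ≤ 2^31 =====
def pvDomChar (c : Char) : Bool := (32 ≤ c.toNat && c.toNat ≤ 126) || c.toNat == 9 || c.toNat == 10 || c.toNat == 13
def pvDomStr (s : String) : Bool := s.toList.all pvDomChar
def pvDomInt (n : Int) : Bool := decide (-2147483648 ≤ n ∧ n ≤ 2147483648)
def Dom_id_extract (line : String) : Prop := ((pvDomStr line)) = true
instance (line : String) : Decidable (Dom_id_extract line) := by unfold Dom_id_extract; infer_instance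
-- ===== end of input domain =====

-- B drops A's split-into-words pass and its flagged inner character loop: it makes one
-- character-level pass over the raw line, accumulating the current word only when it began
-- with a digit and committing it at each space (objective: alternative; same O(n) cost).

-- ===== PORT A =====
-- inner 'for c in value' loop with the notFound flag; both branches break
def idACharLoop (value : String) : List Char → Bool → String → String
  | [], _, id_nbr => id_nbr
  | c :: _, notFound, id_nbr =>
      if notFound then
        if '0' ≤ c ∧ c ≤ '9' then value
        else id_nbr
      else id_nbr

-- outer 'for value in id_nbrs' loop
def idAWordLoop : List String → String → String
  | [], id_nbr => id_nbr
  | v :: rest, id_nbr => idAWordLoop rest (idACharLoop v v.toList true id_nbr)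

def id_extract (line : String) : String :=
  if PySem.Str.isIn "ationale" (PySem.Str.lower line) = true
      ∨ PySem.Str.isIn "carte" (PySem.Str.lower line) = true
      ∨ PySem.Str.isIn " identite" (PySem.Str.lower line) = true then
    idAWordLoop ((PySem.Str.split? line " ").getD []) "-1"
  else "-1"

-- ===== PORT B =====
-- loop body: state (best, cur, prev); python strings best/cur carried as List Char
def idBStep (st : List Char × Option (List Char) × Char) (c : Char) :
    List Char × Option (List Char) × Char :=
  match st with
  | (best, cur, _prev) =>
    if c = ' ' then
      ((match cur with | some w => w | none => best), none, c)
    else if _prev = ' ' ∧ ('0' ≤ c ∧ c ≤ '9') then (best, some [c], c)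
    else match cur with
      | some w => (best, some (w ++ [c]), c)
      | none => (best, none, c)

-- 'return cur if cur is not None else best'
def idBFinish : List Char × Option (List Char) × Char → List Char
  | (best, cur, _) => match cur with | some w => w | none => best

def id_extract_alt (line : String) : String :=
  let low := PySem.Str.lower line
  if PySem.Str.isIn "ationale" low = true
      ∨ PySem.Str.isIn "carte" low = true
      ∨ PySem.Str.isIn " identite" low = true then
    String.ofList (idBFinish (line.toList.foldl idBStep ("-1".toList, none, ' ')))
  else "-1"

-- ===== PRECONDITION & SPEC =====
def Spec_id_extract (line : String) (out : String) : Prop := out = id_extract_alt line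
instance (line : String) (out : String) : Decidable (Spec_id_extract line out) := by unfold Spec_id_extract; infer_instance

-- ===== CLAIM (what is proved, stated in full; the proofs are below) =====
def Claim_equal_id_extract : Prop := ∀ (line : String), Dom_id_extract line → Spec_id_extract line (id_extract line)

-- ===== LEMMAS AND PROOFS =====

-- w begins with an ASCII digit
def digList : List Char → Bool
  | [] => false
  | c :: _ => decide ('0' ≤ c ∧ c ≤ '9')

def strDig (v : String) : Bool := digList v.toList

-- last digit-leading word
def ldw (ws : List (List Char)) : Option (List Char) := ws.reverse.find? digList

-- the words of s split on ' ' (Python's s.split(" "))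
def pvWords : List Char → List (List Char)
  | [] => [[]]
  | c :: s =>
      if c = ' ' then [] :: pvWords s
      else match pvWords s with
        | [] => [[c]]
        | w :: ws => (c :: w) :: ws

theorem pvWords_ne_nil (s : List Char) : pvWords s ≠ [] := by
  cases s with
  | nil => simp [pvWords]
  | cons c s =>
      simp only [pvWords]
      split
      · simp
      · split <;> simp

def consFirst (u : List Char) : List (List Char) → List (List Char)
  | [] => [u]
  | w :: ws => (u ++ w) :: ws

theorem splitOn_go_eq (l : List Char) : ∀ (fuel : Nat) (cur : List Char) (acc : List (List Char)),
    l.length < fuel →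
    PySem.Chars.splitOn.go [' '] fuel l cur acc = acc.reverse ++ consFirst cur.reverse (pvWords l) := by
  induction l with
  | nil =>
      intro fuel cur acc h
      obtain ⟨f, rfl⟩ : ∃ f, fuel = f + 1 := ⟨fuel - 1, by omega⟩
      simp [PySem.Chars.splitOn.go, pvWords, consFirst]
  | cons c rest ih =>
      intro fuel cur acc h
      obtain ⟨f, rfl⟩ : ∃ f, fuel = f + 1 := ⟨fuel - 1, by omega⟩
      by_cases hc : c = ' '
      · subst hc
        have hpre : [' '].isPrefixOf (' ' :: rest) = true := by simp [List.isPrefixOf]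
        simp only [PySem.Chars.splitOn.go, hpre, if_pos]
        have hdrop : List.drop [' '].length (' ' :: rest) = rest := rfl
        rw [hdrop, ih f [] (cur.reverse :: acc) (by simpa using Nat.lt_of_succ_lt_succ h)]
        cases hw : pvWords rest with
        | nil => exact absurd hw (pvWords_ne_nil rest)
        | cons w ws => simp [pvWords, consFirst, hw]
      · have hpre : [' '].isPrefixOf (c :: rest) = false := by
          simp [List.isPrefixOf]; exact fun hcc => absurd hcc.symm hc
        simp only [PySem.Chars.splitOn.go, hpre, Bool.false_eq_true, if_false]
        rw [ih f (c :: cur) acc (by simpa using Nat.lt_of_succ_lt_succ h)]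
        cases hw : pvWords rest with
        | nil => exact absurd hw (pvWords_ne_nil rest)
        | cons w ws => simp [pvWords, consFirst, hw, hc]

theorem splitOn_eq_pvWords (l : List Char) : PySem.Chars.splitOn l [' '] = pvWords l := by
  unfold PySem.Chars.splitOn
  rw [splitOn_go_eq l (l.length + 1) [] [] (by omega)]
  cases hw : pvWords l with
  | nil => exact absurd hw (pvWords_ne_nil l)
  | cons w ws => simp [consFirst]

theorem ldw_cons (w : List Char) (ws : List (List Char)) :
    ldw (w :: ws) = (ldw ws).or (if digList w then some w else none) := by
  simp only [ldw, List.reverse_cons, List.find?_append]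
  cases hf : ws.reverse.find? digList with
  | some u => simp
  | none => cases hd : digList w <;> simp [List.find?, hd]

-- A-side loops compute the last digit-leading word
theorem idACharLoop_eq (v : String) (acc : String) :
    idACharLoop v v.toList true acc = if strDig v then v else acc := by
  unfold strDig digList
  cases h : v.toList with
  | nil => simp [idACharLoop]
  | cons c cs => simp [idACharLoop]

theorem idAWordLoop_eq (ws : List String) (acc : String) :
    idAWordLoop ws acc = ((ws.reverse.find? strDig).getD acc) := by
  induction ws generalizing acc with
  | nil => simp [idAWordLoop]
  | cons v rest ih =>
      simp only [idAWordLoop, ih, List.reverse_cons, List.find?_append, idACharLoop_eq]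
      cases hf : rest.reverse.find? strDig with
      | some w => simp
      | none => cases hd : strDig v <;> simp [List.find?, hd]

-- B-side character scan computes the same, characterized against pvWords
theorem idB_scan (s : List Char) :
    (∀ best, idBFinish (s.foldl idBStep (best, none, ' ')) = (ldw (pvWords s)).getD best) ∧
    (∀ best w prev, prev ≠ ' ' →
      idBFinish (s.foldl idBStep (best, some w, prev)) =
        (ldw (pvWords s).tail).getD (w ++ (pvWords s).headI)) ∧
    (∀ best prev, prev ≠ ' ' →
      idBFinish (s.foldl idBStep (best, none, prev)) = (ldw (pvWords s).tail).getD best) := by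
  induction s with
  | nil =>
      refine ⟨fun best => ?_, fun best w prev _ => ?_, fun best prev _ => ?_⟩ <;>
        simp [idBFinish, pvWords, ldw, List.find?, digList]
  | cons c s ih =>
      obtain ⟨ih1, ih2, ih3⟩ := ih
      obtain ⟨w0, ws0, hw⟩ : ∃ w0 ws0, pvWords s = w0 :: ws0 := by
        cases h : pvWords s with
        | nil => exact absurd h (pvWords_ne_nil s)
        | cons a b => exact ⟨a, b, rfl⟩
      refine ⟨fun best => ?_, fun best w prev hprev => ?_, fun best prev hprev => ?_⟩
      · -- word start: prev = ' ', cur = none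
        by_cases hc : c = ' '
        · subst hc
          have hstep : idBStep (best, none, ' ') ' ' = (best, none, ' ') := by simp [idBStep]
          rw [List.foldl_cons, hstep, ih1 best]
          simp [pvWords, ldw_cons, digList]
        · by_cases hd : '0' ≤ c ∧ c ≤ '9'
          · have hstep : idBStep (best, none, ' ') c = (best, some [c], c) := by
              simp [idBStep, hc, hd]
            rw [List.foldl_cons, hstep, ih2 best [c] c hc]
            simp [pvWords, hc, hw, ldw_cons, digList, hd]
          · have hstep : idBStep (best, none, ' ') c = (best, none, c) := by
              simp [idBStep, hc, hd]
            rw [List.foldl_cons, hstep, ih3 best c hc]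
            simp [pvWords, hc, hw, ldw_cons, digList, hd]
      · -- mid-word, accumulating: cur = some w, prev ≠ ' '
        by_cases hc : c = ' '
        · subst hc
          have hstep : idBStep (best, some w, prev) ' ' = (w, none, ' ') := by simp [idBStep]
          rw [List.foldl_cons, hstep, ih1 w]
          simp [pvWords]
        · have hstep : idBStep (best, some w, prev) c = (best, some (w ++ [c]), c) := by
            simp [idBStep, hc, hprev]
          rw [List.foldl_cons, hstep, ih2 best (w ++ [c]) c hc]
          simp [pvWords, hc, hw]
      · -- mid-word, skipping: cur = none, prev ≠ ' '
        by_cases hc : c = ' '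
        · subst hc
          have hstep : idBStep (best, none, prev) ' ' = (best, none, ' ') := by simp [idBStep]
          rw [List.foldl_cons, hstep, ih1 best]
          simp [pvWords]
        · have hstep : idBStep (best, none, prev) c = (best, none, c) := by
            simp [idBStep, hc, hprev]
          rw [List.foldl_cons, hstep, ih3 best c hc]
          simp [pvWords, hc, hw]

-- A's word list, mapped to char lists, is pvWords
theorem split_words (line : String) :
    ∃ ws : List String, PySem.Str.split? line " " = some ws ∧
      ws.map String.toList = pvWords line.toList := by
  have h := PySem.Str.split?_map line " "
  rw [show (" " : String).toList = [' '] from rfl] at h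
  cases hs : PySem.Str.split? line " " with
  | none =>
      rw [hs] at h
      simp [PySem.Chars.split?] at h
  | some ws =>
      rw [hs] at h
      refine ⟨ws, rfl, ?_⟩
      simp only [Option.map_some] at h
      rw [← splitOn_eq_pvWords line.toList]
      have : PySem.Chars.split? line.toList [' '] = some (PySem.Chars.splitOn line.toList [' ']) := by
        simp [PySem.Chars.split?]
      rw [this] at h
      exact Option.some.inj h

-- ===== VERDICT (by name: the statement is the Claim_ definition above) =====
theorem id_extract_spec : Claim_equal_id_extract := by
  intro line _
  by_cases h : PySem.Str.isIn "ationale" (PySem.Str.lower line) = true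
      ∨ PySem.Str.isIn "carte" (PySem.Str.lower line) = true
      ∨ PySem.Str.isIn " identite" (PySem.Str.lower line) = true
  · simp only [Spec_id_extract, id_extract, id_extract_alt, if_pos h]
    obtain ⟨ws, hws, hmap⟩ := split_words line
    rw [hws, Option.getD_some, idAWordLoop_eq, (idB_scan line.toList).1 "-1".toList]
    have hrev : (pvWords line.toList).reverse = ws.reverse.map String.toList := by
      rw [← hmap, List.map_reverse]
    rw [ldw, hrev, List.find?_map]
    cases hf : ws.reverse.find? (digList ∘ String.toList) with
    | none =>
        have hsd : ws.reverse.find? strDig = none := hf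
        rw [hsd]; decide
    | some v =>
        have hsd : ws.reverse.find? strDig = some v := hf
        rw [hsd]
        simp only [Option.map_some, Option.getD_some]
        exact String.ofList_toList.symm
  · simp only [Spec_id_extract, id_extract, id_extract_alt, if_neg h]
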